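-- pv_equiv track=rewrite | github.com/spotUP/DEViLBOX | third-party/musicline_playback-main/tools/value_run_compare.py | find_best_offset
-- ===== SOURCE A (Python) =====
-- def find_best_offset(uade_vals, mline_vals, max_offset=10):
--     """Find the run offset that maximizes value matches between UADE and MLINE.
--
--     Returns (offset, matches, compare_len) where positive offset means MLINE
--     is ahead (skip first 'offset' MLINE runs to align).
--     """
--     best_off = 0
--     best_match = 0
--     best_len = 0
--     for off in range(-max_offset, max_offset + 1):
--         u_start = max(0, off)
--         m_start = max(0, -off)
--         compare_len = min(len(uade_vals) - u_start, len(mline_vals) - m_start)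
--         if compare_len <= 0:
--             continue
--         matches = sum(1 for i in range(compare_len)
--                       if uade_vals[u_start + i] == mline_vals[m_start + i])
--         if matches > best_match:
--             best_match = matches
--             best_off = off
--             best_len = compare_len
--     return best_off, best_match, best_len
-- ===== SOURCE B (Python) =====
-- def find_best_offset(uade_vals, mline_vals, max_offset=10):
--     """Find the run offset that maximizes value matches between UADE and MLINE.
--
--     Returns (offset, matches, compare_len) where positive offset means MLINE
--     is ahead (skip first 'offset' MLINE runs to align).
--     """
--     # index: value -> list of its positions in mline_vals
--     index = {}
--     for q, v in enumerate(mline_vals):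
--         index[v] = index.get(v, []) + [q]
--     # every equal-value aligned pair contributes its offset p - q
--     offs = []
--     for p, v in enumerate(uade_vals):
--         for q in index.get(v, []):
--             off = p - q
--             if -max_offset <= off <= max_offset:
--                 offs.append(off)
--     counts = {}
--     for o in offs:
--         counts[o] = counts.get(o, 0) + 1
--     best_off = 0
--     best_match = 0
--     best_len = 0
--     for off in range(-max_offset, max_offset + 1):
--         c = counts.get(off, 0)
--         if c > best_match:
--             best_match = c
--             best_off = off
--             best_len = min(len(uade_vals) - max(0, off), len(mline_vals) - max(0, -off))
--     return best_off, best_match, best_len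
-- ===== Notes on version B (the rewrite author's own statement) =====
-- stated objective: alternative
-- what changed: Instead of rescanning the aligned windows for each of the 2*max_offset+1 offsets, B builds a value->positions dict for mline_vals, buckets the offset p-q of every equal-value index pair into an offset counter, and then runs the same ascending strict-improvement selection over the counter; it trades A's fixed per-offset scans for work proportional to the number of equal-value pairs, which is worse on duplicate-heavy inputs.
import Mathlib
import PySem

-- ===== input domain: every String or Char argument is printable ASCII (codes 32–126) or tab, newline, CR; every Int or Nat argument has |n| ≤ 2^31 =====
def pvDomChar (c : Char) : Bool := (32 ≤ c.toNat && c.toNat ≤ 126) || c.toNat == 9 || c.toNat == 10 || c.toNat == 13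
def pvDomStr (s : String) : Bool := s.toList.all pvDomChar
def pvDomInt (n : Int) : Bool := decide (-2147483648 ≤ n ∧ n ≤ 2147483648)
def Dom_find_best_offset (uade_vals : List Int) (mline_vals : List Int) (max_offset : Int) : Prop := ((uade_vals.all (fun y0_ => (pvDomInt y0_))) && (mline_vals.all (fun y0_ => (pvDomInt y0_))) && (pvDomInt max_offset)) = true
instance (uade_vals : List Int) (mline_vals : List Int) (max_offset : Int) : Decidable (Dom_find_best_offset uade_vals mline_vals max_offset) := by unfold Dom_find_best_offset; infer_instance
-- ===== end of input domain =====

-- B replaces A's per-offset rescan by bucketing the offsets of all equal-value index pairs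
-- (value → positions dict, then an offset counter) before the same ascending strict-improvement
-- selection; equivalence of the RETURN value is proved (neither version mutates its arguments).

-- ===== PORT A =====
def find_best_offset (uade_vals : List Int) (mline_vals : List Int) (max_offset : Int) : Int × Int × Int :=
  (PySem.List.pyRange (-max_offset) (max_offset + 1)).foldl
    (fun st off =>
      let u_start := max 0 off
      let m_start := max 0 (-off)
      let compare_len := min (PySem.List.len uade_vals - u_start) (PySem.List.len mline_vals - m_start)
      if compare_len ≤ 0 then st
      else
        let matches_ : Int := (PySem.List.pyRange 0 compare_len).foldl
          (fun acc i =>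
            if PySem.List.pyGet? uade_vals (u_start + i) = PySem.List.pyGet? mline_vals (m_start + i)
            then acc + 1 else acc) 0
        if matches_ > st.2.1 then (off, matches_, compare_len) else st)
    (0, 0, 0)

-- ===== PORT B =====
def find_best_offset_alt (uade_vals : List Int) (mline_vals : List Int) (max_offset : Int) : Int × Int × Int :=
  -- index: value -> list of its positions in mline_vals
  let index : PySem.Dict Int (List Int) :=
    (PySem.List.enumerate mline_vals).foldl
      (fun d qv => d.modify qv.2 [] (fun l => l ++ [qv.1])) PySem.Dict.empty
  -- every equal-value aligned pair contributes its offset p - q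
  let offs : List Int :=
    (PySem.List.enumerate uade_vals).foldl
      (fun acc pv =>
        (index.getD pv.2 []).foldl
          (fun acc2 q =>
            if -max_offset ≤ pv.1 - q ∧ pv.1 - q ≤ max_offset then acc2 ++ [pv.1 - q] else acc2)
          acc)
      []
  let counts : PySem.Dict Int Int :=
    offs.foldl (fun d o => d.insert o (d.getD o 0 + 1)) PySem.Dict.empty
  (PySem.List.pyRange (-max_offset) (max_offset + 1)).foldl
    (fun st off =>
      let c := counts.getD off 0
      if c > st.2.1 then
        (off, c, min (PySem.List.len uade_vals - max 0 off) (PySem.List.len mline_vals - max 0 (-off)))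
      else st)
    (0, 0, 0)

-- ===== PRECONDITION & SPEC =====
def Spec_find_best_offset (uade_vals : List Int) (mline_vals : List Int) (max_offset : Int) (out : Int × Int × Int) : Prop := out = find_best_offset_alt uade_vals mline_vals max_offset
instance (uade_vals : List Int) (mline_vals : List Int) (max_offset : Int) (out : Int × Int × Int) : Decidable (Spec_find_best_offset uade_vals mline_vals max_offset out) := by unfold Spec_find_best_offset; infer_instance

-- ===== CLAIM (what is proved, stated in full; the proofs are below) =====
def Claim_equal_find_best_offset : Prop := ∀ (uade_vals : List Int) (mline_vals : List Int) (max_offset : Int), Dom_find_best_offset uade_vals mline_vals max_offset → Spec_find_best_offset uade_vals mline_vals max_offset (find_best_offset uade_vals mline_vals max_offset)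

-- ===== LEMMAS AND PROOFS =====

def pvCnt (u m : List Int) (off : Int) : Int :=
  ((PySem.List.pyRange 0 (PySem.List.len u)).countP
    (fun j => decide (0 ≤ j - off ∧ j - off < (m.length : Int) ∧
      PySem.List.pyGet? u j = PySem.List.pyGet? m (j - off))) : Int)

lemma pv_matchesA_eq (u m : List Int) (off : Int) :
    ((PySem.List.pyRange 0 (min (PySem.List.len u - max 0 off) (PySem.List.len m - max 0 (-off)))).foldl
      (fun acc i =>
        if PySem.List.pyGet? u (max 0 off + i) = PySem.List.pyGet? m (max 0 (-off) + i)
        then acc + 1 else acc) (0 : Int)) = pvCnt u m off := by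
  have hdiff : max 0 off - max 0 (-off) = off := by omega
  rw [PySem.List.foldl_ite_add_one]
  unfold pvCnt
  simp only [PySem.List.len_eq] at *
  by_cases hc : min ((u.length : Int) - max 0 off) ((m.length : Int) - max 0 (-off)) ≤ 0
  · rw [PySem.List.pyRange_one_eq_nil hc]
    have hz : (PySem.List.pyRange 0 (u.length : Int)).countP
        (fun j => decide (0 ≤ j - off ∧ j - off < (m.length : Int) ∧
          PySem.List.pyGet? u j = PySem.List.pyGet? m (j - off))) = 0 := by
      rw [List.countP_eq_zero]
      intro j hj
      rw [PySem.List.mem_pyRange_one] at hj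
      simp only [decide_eq_true_eq, not_and]
      rintro h1 h2
      omega
    simp only [List.countP_nil, Nat.cast_zero, add_zero, hz]
  · rw [not_le] at hc
    set cl := min ((u.length : Int) - max 0 off) ((m.length : Int) - max 0 (-off)) with hcl
    have h1 : (0:Int) ≤ max 0 off := le_max_left _ _
    have h2 : max 0 off ≤ (u.length : Int) := by omega
    have h3 : max 0 off ≤ max 0 off + cl := by omega
    have h4 : max 0 off + cl ≤ (u.length : Int) := by omega
    rw [PySem.List.pyRange_one_append 0 (max 0 off) ((u.length : Int)) h1 h2,
        PySem.List.pyRange_one_append (max 0 off) (max 0 off + cl) ((u.length : Int)) h3 h4,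
        List.countP_append, List.countP_append]
    have hz1 : (PySem.List.pyRange 0 (max 0 off)).countP
        (fun j => decide (0 ≤ j - off ∧ j - off < (m.length : Int) ∧
          PySem.List.pyGet? u j = PySem.List.pyGet? m (j - off))) = 0 := by
      rw [List.countP_eq_zero]
      intro j hj
      rw [PySem.List.mem_pyRange_one] at hj
      simp only [decide_eq_true_eq, not_and]
      rintro hb1 hb2
      omega
    have hz2 : (PySem.List.pyRange (max 0 off + cl) ((u.length : Int))).countP
        (fun j => decide (0 ≤ j - off ∧ j - off < (m.length : Int) ∧
          PySem.List.pyGet? u j = PySem.List.pyGet? m (j - off))) = 0 := by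
      rw [List.countP_eq_zero]
      intro j hj
      rw [PySem.List.mem_pyRange_one] at hj
      simp only [decide_eq_true_eq, not_and]
      rintro hb1 hb2
      omega
    have hmid : (PySem.List.pyRange (max 0 off) (max 0 off + cl)).countP
        (fun j => decide (0 ≤ j - off ∧ j - off < (m.length : Int) ∧
          PySem.List.pyGet? u j = PySem.List.pyGet? m (j - off)))
        = (PySem.List.pyRange 0 cl).countP
        (fun i => decide (PySem.List.pyGet? u (max 0 off + i) = PySem.List.pyGet? m (max 0 (-off) + i))) := by
      rw [PySem.List.pyRange_one (max 0 off) (max 0 off + cl), PySem.List.pyRange_one 0 cl,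
          List.countP_map, List.countP_map]
      simp only [add_sub_cancel_left, sub_zero]
      apply List.countP_congr
      intro k hk
      rw [List.mem_range] at hk
      have hk' : (k : Int) < cl := by omega
      simp only [Function.comp_apply, decide_eq_true_eq, zero_add]
      have e : max 0 off + (k : Int) - off = max 0 (-off) + (k : Int) := by omega
      rw [e]
      constructor
      · rintro ⟨-, -, h⟩; exact h
      · intro h; exact ⟨by omega, by omega, h⟩
    rw [hz1, hz2, hmid]
    push_cast
    ring

def pvIndex (m : List Int) : PySem.Dict Int (List Int) :=
  (PySem.List.enumerate m).foldl
    (fun d qv => d.modify qv.2 [] (fun l => l ++ [qv.1])) PySem.Dict.empty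

lemma pv_index_getD (m : List Int) (v : Int) :
    (pvIndex m).getD v [] =
      ((PySem.List.enumerate m).filter (fun qw => qw.2 == v)).map (fun qw => qw.1) := by
  unfold pvIndex
  have hmap : ((PySem.List.enumerate m).map (fun qv : Int × Int => (qv.2, qv.1))).foldl
      (fun d p => d.modify p.1 [] (fun l => l ++ [p.2])) (PySem.Dict.empty : PySem.Dict Int (List Int)) =
      (PySem.List.enumerate m).foldl (fun d qv => d.modify qv.2 [] (fun l => l ++ [qv.1]))
        PySem.Dict.empty := List.foldl_map
  rw [← hmap, PySem.Dict.getD_foldl_modify_append, PySem.Dict.getD_empty]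
  rw [List.filter_map, List.map_map]
  rfl

def pvOffs (u m : List Int) (mo : Int) : List Int :=
  (PySem.List.enumerate u).foldl
    (fun acc pv =>
      ((pvIndex m).getD pv.2 []).foldl
        (fun acc2 q => if -mo ≤ pv.1 - q ∧ pv.1 - q ≤ mo then acc2 ++ [pv.1 - q] else acc2)
        acc)
    []

lemma pv_sum_ite_nat {α : Type} (P : α → Prop) [DecidablePred P] (l : List α) :
    (l.map (fun x => if P x then 1 else 0)).sum = l.countP (fun x => decide (P x)) := by
  induction l with
  | nil => rfl
  | cons x t ih =>
    by_cases h : P x <;> simp [h, ih] <;> omega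

lemma pv_countP_flatMap {α β : Type} (l : List α) (g : α → List β) (p : β → Bool) :
    (l.flatMap g).countP p = (l.map (fun x => (g x).countP p)).sum := by
  induction l with
  | nil => rfl
  | cons x t ih => simp [List.flatMap_cons, List.countP_append, ih]

lemma pv_ilist_nodup (m : List Int) (v : Int) :
    (((PySem.List.enumerate m).filter (fun qw => qw.2 == v)).map (fun qw => qw.1)).Nodup := by
  have hsub : (((PySem.List.enumerate m).filter (fun qw => qw.2 == v)).map (fun qw => qw.1)).Sublist
      ((PySem.List.enumerate m).map (fun qw => qw.1)) :=
    List.Sublist.map _ List.filter_sublist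
  have hnd : ((PySem.List.enumerate m).map (fun qw => qw.1)).Nodup := by
    rw [PySem.List.map_fst_enumerate]
    exact PySem.List.nodup_pyRange_one _ _
  exact List.Nodup.sublist hsub hnd

lemma pv_ilist_mem (m : List Int) (v q₀ : Int) :
    q₀ ∈ (((PySem.List.enumerate m).filter (fun qw => qw.2 == v)).map (fun qw => qw.1)) ↔
      (0 ≤ q₀ ∧ q₀ < (m.length : Int) ∧ PySem.List.pyGet? m q₀ = some v) := by
  simp only [List.mem_map, List.mem_filter, beq_iff_eq]
  constructor
  · rintro ⟨qw, ⟨hq, hv⟩, rfl⟩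
    rw [PySem.List.mem_enumerate_iff] at hq
    obtain ⟨k, hk, rfl⟩ := hq
    refine ⟨by omega, by omega, ?_⟩
    simp only [zero_add]
    rw [PySem.List.pyGet?_natCast]
    simp [List.getElem?_eq_getElem hk]
    exact hv
  · rintro ⟨hq0, hqlt, hget⟩
    refine ⟨(q₀, v), ⟨?_, rfl⟩, rfl⟩
    rw [PySem.List.mem_enumerate_iff]
    refine ⟨q₀.toNat, by omega, ?_⟩
    have e : (0 : Int) + (q₀.toNat : Int) = q₀ := by omega
    rw [e]
    have := PySem.List.pyGet?_eq_some_getElem m hq0 hqlt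
    rw [this] at hget
    simp at hget
    rw [hget]

lemma pv_ilist_count (m : List Int) (v q₀ : Int) :
    (((PySem.List.enumerate m).filter (fun qw => qw.2 == v)).map (fun qw => qw.1)).count q₀
      = if (0 ≤ q₀ ∧ q₀ < (m.length : Int) ∧ PySem.List.pyGet? m q₀ = some v) then 1 else 0 := by
  by_cases h : q₀ ∈ (((PySem.List.enumerate m).filter (fun qw => qw.2 == v)).map (fun qw => qw.1))
  · rw [if_pos ((pv_ilist_mem m v q₀).mp h)]
    have h1 := List.count_pos_iff.mpr h
    have h2 := (List.nodup_iff_count_le_one.mp (pv_ilist_nodup m v)) q₀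
    omega
  · rw [if_neg (fun hc => h ((pv_ilist_mem m v q₀).mpr hc)), List.count_eq_zero.mpr h]

lemma pv_count_offs (u m : List Int) (mo off : Int) (h1 : -mo ≤ off) (h2 : off ≤ mo) :
    ((pvOffs u m mo).count off : Int) = pvCnt u m off := by
  have hoffs : pvOffs u m mo = (PySem.List.enumerate u).flatMap
      (fun pv => (((pvIndex m).getD pv.2 []).filter
        (fun q => decide (-mo ≤ pv.1 - q ∧ pv.1 - q ≤ mo))).map (fun q => pv.1 - q)) := by
    unfold pvOffs
    refine Eq.trans (PySem.List.foldl_congr_mem' _ _ _ _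
      (fun pv _ acc => PySem.List.foldl_append_ite _ _ _ _)) ?_
    rw [PySem.List.foldl_append_eq_flatMap, List.nil_append]
  rw [hoffs, List.count_eq_countP, pv_countP_flatMap]
  have hinner : ∀ pv : Int × Int,
      ((((pvIndex m).getD pv.2 []).filter
        (fun q => decide (-mo ≤ pv.1 - q ∧ pv.1 - q ≤ mo))).map (fun q => pv.1 - q)).countP
          (fun x => x == off)
      = if (0 ≤ pv.1 - off ∧ pv.1 - off < (m.length : Int) ∧
            PySem.List.pyGet? m (pv.1 - off) = some pv.2) then 1 else 0 := by
    intro pv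
    rw [List.countP_map, List.countP_filter]
    have hcongr : ∀ q ∈ (pvIndex m).getD pv.2 [],
        (((fun x => x == off) ∘ fun q => pv.1 - q) q &&
          decide (-mo ≤ pv.1 - q ∧ pv.1 - q ≤ mo)) = true ↔ (q == pv.1 - off) = true := by
      intro q _
      simp only [Function.comp_apply, Bool.and_eq_true, beq_iff_eq, decide_eq_true_eq]
      omega
    rw [List.countP_congr hcongr, ← List.count_eq_countP, pv_index_getD, pv_ilist_count]
  rw [List.map_congr_left (fun pv _ => hinner pv), pv_sum_ite_nat]
  unfold pvCnt
  rw [PySem.List.enumerate_eq_map_pyRange u 0, List.countP_map]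
  congr 1
  apply List.countP_congr
  intro j hj
  rw [PySem.List.mem_pyRange_one] at hj
  rw [PySem.List.len_eq] at hj
  simp only [Function.comp_apply, decide_eq_true_eq]
  have hju : PySem.List.pyGet? u j = some (PySem.List.pyGetD u j 0) := by
    rw [PySem.List.pyGet?_eq_some_getElem u hj.1 hj.2, PySem.List.pyGetD_eq_getElem u 0 hj.1 hj.2]
  constructor
  · rintro ⟨a, b, c⟩; exact ⟨a, b, by rw [hju, c]⟩
  · rintro ⟨a, b, c⟩; exact ⟨a, b, by rw [hju] at c; exact c.symm⟩

lemma pv_cnt_zero_of_nonpos (u m : List Int) (off : Int)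
    (h : min (PySem.List.len u - max 0 off) (PySem.List.len m - max 0 (-off)) ≤ 0) :
    pvCnt u m off = 0 := by
  have h2 := pv_matchesA_eq u m off
  rw [PySem.List.pyRange_one_eq_nil h] at h2
  simpa using h2.symm

lemma pv_cnt_nonneg (u m : List Int) (off : Int) : 0 ≤ pvCnt u m off := by
  unfold pvCnt; positivity

def pvCounts (u m : List Int) (mo : Int) : PySem.Dict Int Int :=
  (pvOffs u m mo).foldl (fun d o => d.insert o (d.getD o 0 + 1)) PySem.Dict.empty

lemma pv_counts_getD (u m : List Int) (mo off : Int) (h1 : -mo ≤ off) (h2 : off ≤ mo) :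
    (pvCounts u m mo).getD off 0 = pvCnt u m off := by
  unfold pvCounts
  rw [PySem.Dict.getD_foldl_insert_add_one, PySem.Dict.getD_empty,
      pv_count_offs u m mo off h1 h2]
  ring

lemma pv_foldl_eq_of_inv {α σ : Type} (l : List α) (f g : σ → α → σ) (P : σ → Prop) (init : σ)
    (h0 : P init) (h : ∀ s a, a ∈ l → P s → f s a = g s a ∧ P (f s a)) :
    l.foldl f init = l.foldl g init := by
  induction l generalizing init with
  | nil => rfl
  | cons x t ih =>
    have hx := h init x (by simp) h0
    simp only [List.foldl_cons, ← hx.1]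
    exact ih (f init x) hx.2 (fun s a ha hs => h s a (List.mem_cons_of_mem _ ha) hs)

-- ===== VERDICT (by name: the statement is the Claim_ definition above) =====
theorem find_best_offset_spec : Claim_equal_find_best_offset := by
  intro u m mo _
  unfold Spec_find_best_offset
  have hB : find_best_offset_alt u m mo =
      (PySem.List.pyRange (-mo) (mo + 1)).foldl
        (fun (st : Int × Int × Int) off =>
          if (pvCounts u m mo).getD off 0 > st.2.1 then
            (off, (pvCounts u m mo).getD off 0,
              min (PySem.List.len u - max 0 off) (PySem.List.len m - max 0 (-off)))
          else st) (0, 0, 0) := rfl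
  rw [hB]
  unfold find_best_offset
  refine pv_foldl_eq_of_inv _ _ _ (fun st => 0 ≤ st.2.1) _ (by norm_num) ?_
  intro st off hmem hP
  have hP' : (0:Int) ≤ st.2.1 := hP
  rw [PySem.List.mem_pyRange_one] at hmem
  have hoff1 : -mo ≤ off := hmem.1
  have hoff2 : off ≤ mo := by omega
  have hcnt : (pvCounts u m mo).getD off 0 = pvCnt u m off :=
    pv_counts_getD u m mo off hoff1 hoff2
  dsimp only
  rw [hcnt, pv_matchesA_eq u m off]
  by_cases hc : min (PySem.List.len u - max 0 off) (PySem.List.len m - max 0 (-off)) ≤ 0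
  · rw [if_pos hc, pv_cnt_zero_of_nonpos u m off hc,
        if_neg (by omega : ¬ ((0:Int) > st.2.1))]
    exact ⟨rfl, hP⟩
  · rw [if_neg hc]
    by_cases hgt : pvCnt u m off > st.2.1
    · rw [if_pos hgt]
      exact ⟨rfl, pv_cnt_nonneg u m off⟩
    · rw [if_neg hgt]
      exact ⟨rfl, hP⟩
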